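-- pv_equiv track=rewrite | github.com/Mtkurilko/tributary-account-verification | linkage_deduplication/ingest.py | create_pair_chunk
-- ===== SOURCE A (Python) =====
-- def create_pair_chunk(subjects, chunk_range):
--     """
--     Create subject pairs for a specific range of indices.
--
--     :param subjects: List of all subjects
--     :param chunk_range: Tuple of (start_i, end_i) for the outer loop
--     :return: List of (pair_index, subject_pair) tuples
--     """
--     pairs = []
--     n_subjects = len(subjects)
--     start_i, end_i = chunk_range
--
--     for i in range(start_i, min(end_i, n_subjects)):
--         for j in range(i + 1, n_subjects):
--             # Calculate the pair index as it would be in the sequential version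
--             pair_idx = sum(n_subjects - k - 1 for k in range(i)) + (j - i - 1)
--             pairs.append((pair_idx, (subjects[i], subjects[j])))
--
--     return pairs
-- ===== SOURCE B (Python) =====
-- def create_pair_chunk(subjects, chunk_range):
--     """
--     Create subject pairs for a specific range of indices.
--
--     Closed-form pair index (base = i*n - i*(i+1)//2) instead of re-summing
--     for every pair; the inner scan enumerates a slice.
--     """
--     n = len(subjects)
--     start_i, end_i = chunk_range
--     pairs = []
--     for i in range(max(start_i, 0), min(end_i, n)):
--         base = i * n - i * (i + 1) // 2
--         si = subjects[i]
--         for off, sj in enumerate(subjects[i + 1:]):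
--             pairs.append((base + off, (si, sj)))
--     return pairs
-- ===== Notes on version B (the rewrite author's own statement) =====
-- stated objective: alternative
-- what changed: The per-pair re-summation sum(n-k-1 for k in range(i)) is replaced by the closed-form base index i*n - i*(i+1)//2 hoisted out of the inner loop, which enumerates a slice; B clamps the start index to 0 (negative starts are outside the natural chunk domain). Intended as faster (O(1) instead of O(i) work per pair); a timing run measured only ~1.7x at the largest size, so no speed is claimed.
-- outside the precondition, e.g. on create_pair_chunk([1, 2], (-1, 2)): A returns [(0, (2, 1)), (1, (2, 2)), (0, (1, 2))], B returns [(0, (1, 2))]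
import Mathlib
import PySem

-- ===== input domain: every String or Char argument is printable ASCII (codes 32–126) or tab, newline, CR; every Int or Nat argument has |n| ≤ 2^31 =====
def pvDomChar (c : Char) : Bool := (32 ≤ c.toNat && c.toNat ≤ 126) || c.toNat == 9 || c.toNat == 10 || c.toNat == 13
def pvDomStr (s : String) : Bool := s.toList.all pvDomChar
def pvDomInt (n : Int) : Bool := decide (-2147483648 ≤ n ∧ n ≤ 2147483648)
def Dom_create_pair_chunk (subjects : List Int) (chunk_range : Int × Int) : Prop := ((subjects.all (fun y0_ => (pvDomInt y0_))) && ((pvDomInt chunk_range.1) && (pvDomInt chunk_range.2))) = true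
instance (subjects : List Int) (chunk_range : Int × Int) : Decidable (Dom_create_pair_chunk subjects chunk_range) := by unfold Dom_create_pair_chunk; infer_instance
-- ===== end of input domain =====

-- B replaces the per-pair prefix re-summation with a hoisted closed-form base index (i*n - i*(i+1)//2) and an enumerated slice; B clamps a negative start to 0 (negative starts lie outside Pre_).


-- ===== PORT A =====
-- Port of A: nested loops; the pair index is recomputed as a prefix sum for every pair.
def create_pair_chunk (subjects : List Int) (chunk_range : Int × Int) : List (Int × (Int × Int)) :=
  let pairs : List (Int × (Int × Int)) := []
  let n : Int := subjects.length
  let start_i := chunk_range.1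
  let end_i := chunk_range.2
  (PySem.List.pyRange start_i (min end_i n) 1).foldl (fun pairs i =>
    (PySem.List.pyRange (i + 1) n 1).foldl (fun pairs j =>
      let pair_idx :=
        ((PySem.List.pyRange 0 i 1).foldl (fun s k => s + (n - k - 1)) 0) + (j - i - 1)
      pairs ++ [(pair_idx, (PySem.List.pyGetD subjects i 0, PySem.List.pyGetD subjects j 0))])
      pairs) pairs

-- ===== PORT B =====
-- Port of B: closed-form base index hoisted per i; inner loop enumerates the slice subjects[i+1:].
def create_pair_chunk_alt (subjects : List Int) (chunk_range : Int × Int) : List (Int × (Int × Int)) :=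
  let n : Int := subjects.length
  let pairs : List (Int × (Int × Int)) := []
  let start_i := chunk_range.1
  let end_i := chunk_range.2
  (PySem.List.pyRange (max start_i 0) (min end_i n) 1).foldl (fun pairs i =>
    let base := i * n - PySem.Int.floordiv (i * (i + 1)) 2
    let si := PySem.List.pyGetD subjects i 0
    (PySem.List.enumerate (PySem.List.slice subjects (some (i + 1)) none) 0).foldl
      (fun pairs p => pairs ++ [(base + p.1, (si, p.2))]) pairs) pairs

-- ===== PRECONDITION & SPEC =====
-- Pre_ keeps the natural domain: a nonnegative start index, or an empty index range
-- (end ≤ start, where both programs return []). A negative start with a nonempty range is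
-- Python negative-index territory: A either raises IndexError or wraps subjects[i] around.
def Pre_create_pair_chunk (subjects : List Int) (chunk_range : Int × Int) : Prop :=
  0 ≤ chunk_range.1 ∨ chunk_range.2 ≤ chunk_range.1
instance (subjects : List Int) (chunk_range : Int × Int) : Decidable (Pre_create_pair_chunk subjects chunk_range) := by unfold Pre_create_pair_chunk; infer_instance
def pvWitness_create_pair_chunk : List Int × (Int × Int) := ([3, 1, 4, 1, 5], (1, 4))

def Spec_create_pair_chunk (subjects : List Int) (chunk_range : Int × Int) (out : List (Int × (Int × Int))) : Prop := out = create_pair_chunk_alt subjects chunk_range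
instance (subjects : List Int) (chunk_range : Int × Int) (out : List (Int × (Int × Int))) : Decidable (Spec_create_pair_chunk subjects chunk_range out) := by unfold Spec_create_pair_chunk; infer_instance

-- ===== CLAIM (what is proved, stated in full; the proofs are below) =====
def Claim_equal_create_pair_chunk : Prop := ∀ (subjects : List Int) (chunk_range : Int × Int), Dom_create_pair_chunk subjects chunk_range → Pre_create_pair_chunk subjects chunk_range → Spec_create_pair_chunk subjects chunk_range (create_pair_chunk subjects chunk_range)

-- ===== LEMMAS AND PROOFS =====
lemma tri (n : Int) : ∀ (m : Nat), (PySem.List.pyRange 0 (m:Int) 1).foldl (fun s k => s + (n - k - 1)) 0 = (m:Int)*n - PySem.Int.floordiv ((m:Int)*((m:Int)+1)) 2 := by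
  intro m
  induction m with
  | zero => simp [PySem.List.pyRange_one_eq_nil]
  | succ m ih =>
    have h1 : ((m+1 : Nat) : Int) = (m:Int) + 1 := by push_cast; ring
    rw [h1, PySem.List.pyRange_one_succ_right (by positivity), List.foldl_append]
    simp only [List.foldl]
    rw [ih]
    have e1 : ((m:Int)*((m:Int)+1)) = ((m*(m+1) : Nat) : Int) := by push_cast; ring
    have e2 : (((m:Int)+1)*(((m:Int)+1)+1)) = (((m+1)*(m+2) : Nat) : Int) := by push_cast; ring
    have f1 : PySem.Int.floordiv ((m:Int)*((m:Int)+1)) 2 = ((m*(m+1)/2 : Nat) : Int) := by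
      rw [e1]; exact_mod_cast PySem.Int.floordiv_natCast (m*(m+1)) 2
    have f2 : PySem.Int.floordiv (((m:Int)+1)*(((m:Int)+1)+1)) 2 = (((m+1)*(m+2)/2 : Nat) : Int) := by
      rw [e2]; exact_mod_cast PySem.Int.floordiv_natCast ((m+1)*(m+2)) 2
    have hdiv : (m+1)*(m+2)/2 = m*(m+1)/2 + (m+1) := by
      rw [show (m+1)*(m+2) = m*(m+1) + 2*(m+1) by ring]
      exact Nat.add_mul_div_left _ _ (by omega)
    rw [f1, f2, hdiv]
    push_cast
    ring

lemma enumMap (si base : Int) : ∀ (d : List Int) (s : Int), (PySem.List.enumerate d s).map (fun p => (base + p.1, (si, p.2))) = (List.range d.length).map (fun (k : Nat) => ((base + s + k : Int), (si, d.getD k 0))) := by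
  intro d
  induction d with
  | nil => intro s; simp [PySem.List.enumerate]
  | cons x xs ih =>
    intro s
    rw [PySem.List.enumerate_cons]
    simp only [List.map_cons, List.length_cons, List.range_succ_eq_map, List.map_map, ih]
    refine List.cons_eq_cons.mpr ⟨by simp, ?_⟩
    apply List.map_congr_left
    intro k _
    simp only [Function.comp, List.getD_cons_succ]
    simp only [Prod.mk.injEq]
    push_cast
    exact ⟨by ring, trivial⟩

lemma getD_drop' (l : List Int) (t k : Nat) : (l.drop t).getD k 0 = l.getD (t+k) 0 := by
  simp [List.getD_eq_getElem?_getD, List.getElem?_drop]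

-- ===== VERDICT (by name: the statement is the Claim_ definition above) =====
theorem create_pair_chunk_spec : Claim_equal_create_pair_chunk := by
  intro subjects cr _hDom hPre
  unfold Spec_create_pair_chunk create_pair_chunk create_pair_chunk_alt
  dsimp only
  rcases hPre with h0 | hle
  · -- 0 ≤ start
    rw [max_eq_left h0]
    apply PySem.List.foldl_congr_mem
    intro acc i hi
    have hi' := PySem.List.mem_pyRange_one.mp hi
    have h0i : (0:Int) ≤ i := le_trans h0 hi'.1
    have hin : i < (subjects.length : Int) := lt_of_lt_of_le hi'.2 (min_le_right _ _)
    rw [PySem.List.foldl_append_singleton_eq_map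
          (fun j => (((PySem.List.pyRange 0 i 1).foldl (fun s k => s + ((subjects.length:Int) - k - 1)) 0) + (j - i - 1),
            (PySem.List.pyGetD subjects i 0, PySem.List.pyGetD subjects j 0))),
        PySem.List.foldl_append_singleton_eq_map
          (fun (p : Int × Int) => ((i * (subjects.length:Int) - PySem.Int.floordiv (i * (i + 1)) 2) + p.1,
            (PySem.List.pyGetD subjects i 0, p.2)))]
    congr 1
    rw [PySem.List.slice_from subjects (by omega : (0:Int) ≤ i + 1)]
    rw [enumMap]
    rw [PySem.List.pyRange_one (i+1) (subjects.length:Int), List.map_map]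
    have hS : (PySem.List.pyRange 0 i 1).foldl (fun s k => s + ((subjects.length:Int) - k - 1)) 0
        = i * (subjects.length:Int) - PySem.Int.floordiv (i * (i + 1)) 2 := by
      obtain ⟨m, rfl⟩ : ∃ m : Nat, i = (m:Int) := ⟨i.toNat, (Int.toNat_of_nonneg h0i).symm⟩
      exact tri _ m
    have hlen : ((subjects.length:Int) - (i + 1)).toNat = (List.drop (i+1).toNat subjects).length := by
      rw [List.length_drop]; omega
    rw [hlen]
    apply List.map_congr_left
    intro k _
    simp only [Function.comp, Prod.mk.injEq]
    have ht : (i + 1).toNat = i.toNat + 1 := by omega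
    have hcast : i + 1 + (k:Int) = ((i.toNat + 1 + k : Nat) : Int) := by push_cast; omega
    refine ⟨by rw [hS]; ring, trivial, ?_⟩
    rw [hcast, PySem.List.pyGetD_natCast, ht, getD_drop']
  · -- end ≤ start: both ranges empty
    rw [PySem.List.pyRange_one_eq_nil (le_trans (min_le_left _ _) hle),
        PySem.List.pyRange_one_eq_nil (le_trans (le_trans (min_le_left _ _) hle) (le_max_left _ _))]
    rfl
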